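-- pv_equiv track=rewrite | github.com/Eswar0811/syntora | backend/hindi_engine.py | _split_latin_token
-- ===== SOURCE A (Python) =====
-- def _split_latin_token(tok: str):
--     i = 0
--     while i < len(tok) and not tok[i].isalpha():
--         i += 1
--     j = len(tok)
--     while j > i and not tok[j - 1].isalpha():
--         j -= 1
--     return tok[:i], tok[i:j], tok[j:]
-- ===== SOURCE B (Python) =====
-- def _split_latin_token(tok: str):
--     alpha = [k for k, c in enumerate(tok) if c.isalpha()]
--     if not alpha:
--         return tok, '', ''
--     i = alpha[0]
--     j = alpha[-1] + 1
--     return tok[:i], tok[i:j], tok[j:]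
-- ===== Notes on version B (the rewrite author's own statement) =====
-- stated objective: alternative
-- what changed: Replaces A's two inward while-loop scans (one from each end) by a single enumerate pass that collects all alphabetic indices and slices at the first and last entry of that table.
import Mathlib
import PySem

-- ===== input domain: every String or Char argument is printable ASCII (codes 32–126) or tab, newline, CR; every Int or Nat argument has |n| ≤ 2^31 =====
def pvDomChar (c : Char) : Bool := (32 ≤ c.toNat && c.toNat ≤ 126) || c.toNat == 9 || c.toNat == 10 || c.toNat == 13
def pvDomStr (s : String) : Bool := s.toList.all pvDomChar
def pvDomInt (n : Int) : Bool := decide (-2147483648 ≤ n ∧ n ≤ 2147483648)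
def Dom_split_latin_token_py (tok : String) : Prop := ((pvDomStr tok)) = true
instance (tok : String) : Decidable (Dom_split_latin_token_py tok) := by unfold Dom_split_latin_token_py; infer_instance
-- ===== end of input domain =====

-- B replaces A's two inward while-scans by one enumerate pass collecting all alphabetic
-- indices and slicing at that table's extremes (objective: alternative decomposition).

-- ===== PORT A =====
-- while i < len(tok) and not tok[i].isalpha(): i += 1
def pvAI (s : List Char) (i : Nat) : Nat :=
  if h : i < s.length then
    if PySem.Chars.isalpha s[i] then i else pvAI s (i + 1)
  else i
termination_by s.length - i

-- while j > i and not tok[j-1].isalpha(): j -= 1   (index j-1 is always in range: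
-- callers keep j ≤ len s, so getD never supplies its default)
def pvAJ (s : List Char) (i j : Nat) : Nat :=
  if _h : i < j then
    if PySem.Chars.isalpha (s.getD (j - 1) ' ') then j else pvAJ s i (j - 1)
  else j
termination_by j

def split_latin_token_py (tok : String) : String × String × String :=
  let s := tok.toList
  let i := pvAI s 0
  let j := pvAJ s i s.length
  (String.ofList (PySem.List.slice s none (some (i : Int))),
   String.ofList (PySem.List.slice s (some (i : Int)) (some (j : Int))),
   String.ofList (PySem.List.slice s (some (j : Int)) none))

-- ===== PORT B =====
def split_latin_token_py_alt (tok : String) : String × String × String :=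
  let s := tok.toList
  let alpha := ((PySem.List.enumerate s).filter (fun p => PySem.Chars.isalpha p.2)).map (·.1)
  if alpha = [] then (tok, "", "")
  else
    let i := alpha.headD 0          -- alpha[0]   (branch guarantees alpha ≠ [])
    let j := alpha.getLastD 0 + 1   -- alpha[-1] + 1
    (String.ofList (PySem.List.slice s none (some i)),
     String.ofList (PySem.List.slice s (some i) (some j)),
     String.ofList (PySem.List.slice s (some j) none))

-- ===== PRECONDITION & SPEC =====
def Spec_split_latin_token_py (tok : String) (out : String × String × String) : Prop := out = split_latin_token_py_alt tok
instance (tok : String) (out : String × String × String) : Decidable (Spec_split_latin_token_py tok out) := by unfold Spec_split_latin_token_py; infer_instance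

-- ===== CLAIM (what is proved, stated in full; the proofs are below) =====
def Claim_equal_split_latin_token_py : Prop := ∀ (tok : String), Dom_split_latin_token_py tok → Spec_split_latin_token_py tok (split_latin_token_py tok)

-- ===== LEMMAS AND PROOFS =====

-- abbreviation used only in the proofs
def pvQ (c : Char) : Bool := !(PySem.Chars.isalpha c)

lemma pvAI_eq (s : List Char) (i : Nat) (hi : i ≤ s.length) :
    pvAI s i = i + ((s.drop i).takeWhile pvQ).length := by
  induction hn : s.length - i generalizing i with
  | zero =>
      have : i = s.length := by omega
      subst this
      rw [pvAI]
      simp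
  | succ n ih =>
      have hlt : i < s.length := by omega
      rw [pvAI, dif_pos hlt, List.drop_eq_getElem_cons hlt, List.takeWhile_cons]
      by_cases hP : PySem.Chars.isalpha s[i]
      · simp [pvQ, hP]
      · rw [if_neg hP, ih (i + 1) (by omega) (by omega)]
        simp [pvQ, hP]
        omega

lemma pvAJ_eq (s : List Char) (i : Nat) (j : Nat) (hij : i ≤ j) (hj : j ≤ s.length) :
    pvAJ s i j = max i (j - ((s.take j).reverse.takeWhile pvQ).length) := by
  induction j with
  | zero =>
      rw [pvAJ]
      simp
      omega
  | succ j ih =>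
      have hjlen : j < s.length := by omega
      rw [pvAJ]
      by_cases hlt : i < j + 1
      · have htake : s.take (j + 1) = s.take j ++ [s[j]] := by
          rw [List.take_add_one]
          simp [hjlen]
        have hget : s.getD (j + 1 - 1) ' ' = s[j] := by
          simp [List.getD_eq_getElem?_getD, hjlen]
        rw [dif_pos hlt, hget, htake]
        simp only [List.reverse_append, List.reverse_cons, List.reverse_nil, List.nil_append,
          List.singleton_append, List.takeWhile_cons]
        by_cases hP : PySem.Chars.isalpha s[j]
        · rw [if_pos hP]
          simp [pvQ, hP]
          omega
        · rw [if_neg hP]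
          simp only [Nat.add_sub_cancel]
          rw [ih (by omega) (by omega)]
          simp [pvQ, hP]
      · rw [dif_neg hlt]
        omega

-- the list of alphabetic indices B builds, with an arbitrary enumerate start
def pvF (s : List Char) (k : Int) : List Int :=
  ((PySem.List.enumerate s k).filter (fun p => PySem.Chars.isalpha p.2)).map (·.1)

lemma pvF_nil (s : List Char) (k : Int) :
    pvF s k = [] ↔ ∀ c ∈ s, PySem.Chars.isalpha c = false := by
  induction s generalizing k with
  | nil => simp [pvF, PySem.List.enumerate_nil]
  | cons c t ih =>
      simp only [pvF, PySem.List.enumerate_cons, List.filter_cons]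
      by_cases hP : PySem.Chars.isalpha c
      · simp [hP]
      · rw [if_neg (by simpa using hP)]
        have := ih (k + 1)
        simp only [pvF] at this
        simp [this, hP]

lemma pvF_headD (s : List Char) (k : Int) (h : pvF s k ≠ []) :
    (pvF s k).headD 0 = k + ((s.takeWhile pvQ).length : Int) := by
  induction s generalizing k with
  | nil => simp [pvF, PySem.List.enumerate_nil] at h
  | cons c t ih =>
      simp only [pvF, PySem.List.enumerate_cons, List.filter_cons] at *
      by_cases hP : PySem.Chars.isalpha c
      · simp [hP, List.takeWhile_cons, pvQ]
      · rw [if_neg (by simp [hP])] at h ⊢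
        rw [ih (k + 1) h]
        simp [List.takeWhile_cons, pvQ, hP]
        push_cast
        ring

lemma pvF_append (s : List Char) (c : Char) (k : Int) :
    pvF (s ++ [c]) k =
      pvF s k ++ (if PySem.Chars.isalpha c then [k + (s.length : Int)] else []) := by
  simp only [pvF, PySem.List.enumerate_append, List.filter_append, List.map_append,
    PySem.List.enumerate_cons, PySem.List.enumerate_nil, List.filter_cons, List.filter_nil]
  by_cases hP : PySem.Chars.isalpha c
  · simp [hP]
  · simp [hP]

lemma pvF_getLastD (s : List Char) (k : Int) (h : pvF s k ≠ []) :
    (pvF s k).getLastD 0 = k + (s.length : Int) - 1 - ((s.reverse.takeWhile pvQ).length : Int) := by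
  induction s using List.reverseRecOn with
  | nil => simp [pvF, PySem.List.enumerate_nil] at h
  | append_singleton t c ih =>
      rw [pvF_append] at h ⊢
      by_cases hP : PySem.Chars.isalpha c
      · simp [hP, List.takeWhile_cons, pvQ]
        omega
      · rw [if_neg hP] at h ⊢
        simp only [List.append_nil] at h ⊢
        rw [ih h]
        simp [List.takeWhile_cons, pvQ, hP]
        push_cast
        ring

-- the first character after the non-alphabetic prefix is alphabetic
lemma pvTakeWhile_getElem (p : Char → Bool) (l : List Char)
    (h : (l.takeWhile p).length < l.length) : p (l[(l.takeWhile p).length]'h) = false := by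
  induction l with
  | nil => simp at h
  | cons c t ih =>
      by_cases hP : p c
      · simp only [List.takeWhile_cons, hP, if_pos, List.length_cons] at h ⊢
        simpa using ih (by omega)
      · simpa [List.takeWhile_cons, hP] using hP

lemma pvTakeWhile_getElem_true (p : Char → Bool) (l : List Char) (m : Nat)
    (h : m < (l.takeWhile p).length) :
    p (l[m]'(lt_of_lt_of_le h ((l.takeWhile_prefix (p := p)).length_le))) = true := by
  have hpref := l.takeWhile_prefix (p := p)
  have hm : (l.takeWhile p)[m] = l[m]'(lt_of_lt_of_le h ((l.takeWhile_prefix (p := p)).length_le)) :=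
    List.IsPrefix.getElem hpref h
  have := List.mem_takeWhile_imp (l := l) (p := p) (x := (l.takeWhile p)[m]) (List.getElem_mem h)
  rwa [hm] at this

theorem split_latin_token_py_spec_aux (tok : String) :
    split_latin_token_py tok = split_latin_token_py_alt tok := by
  simp only [split_latin_token_py, split_latin_token_py_alt]
  set s := tok.toList with hs
  have halpha : ((PySem.List.enumerate s).filter (fun p => PySem.Chars.isalpha p.2)).map (·.1)
      = pvF s 0 := rfl
  have hiA : pvAI s 0 = (s.takeWhile pvQ).length := by
    simpa using pvAI_eq s 0 (by omega)
  have hiAle : (s.takeWhile pvQ).length ≤ s.length := (s.takeWhile_prefix (p := pvQ)).length_le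
  have htwrle : (s.reverse.takeWhile pvQ).length ≤ s.length := by
    simpa using (s.reverse.takeWhile_prefix (p := pvQ)).length_le
  have hjA : pvAJ s (pvAI s 0) s.length
      = max (s.takeWhile pvQ).length (s.length - (s.reverse.takeWhile pvQ).length) := by
    rw [hiA, pvAJ_eq s _ s.length hiAle le_rfl, List.take_length]
  rw [halpha]
  by_cases hF : pvF s 0 = []
  · -- no alphabetic character: A's i and j both run to the boundary, B returns (tok, '', '')
    have hall : ∀ c ∈ s, PySem.Chars.isalpha c = false := (pvF_nil s 0).mp hF
    have htw : s.takeWhile pvQ = s := by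
      apply List.takeWhile_eq_self_iff.mpr
      intro x hx
      simp [pvQ, hall x hx]
    rw [if_pos hF, hjA, hiA, htw]
    have hmax : max s.length (s.length - (s.reverse.takeWhile pvQ).length) = s.length := by omega
    rw [hmax]
    refine Prod.ext ?_ (Prod.ext ?_ ?_)
    · simp [PySem.List.slice_to_natCast, List.take_of_length_le]
      rw [hs]
      exact String.ofList_toList
    · simp [PySem.List.slice_natCast]
    · simp [PySem.List.slice_from_natCast]
  · -- at least one alphabetic character
    have hne : ¬ (∀ c ∈ s, PySem.Chars.isalpha c = false) := fun hall => hF ((pvF_nil s 0).mpr hall)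
    have hiAlt : (s.takeWhile pvQ).length < s.length := by
      rcases lt_or_eq_of_le hiAle with h | h
      · exact h
      · exfalso
        apply hne
        intro c hc
        have := List.mem_takeWhile_imp (l := s) (p := pvQ)
          (x := c) (by rw [(s.takeWhile_prefix (p := pvQ)).eq_of_length h]; exact hc)
        simpa [pvQ] using this
    have hAtChar : PySem.Chars.isalpha (s[(s.takeWhile pvQ).length]'hiAlt) = true := by
      have := pvTakeWhile_getElem pvQ s hiAlt
      simpa [pvQ] using this
    -- leading and trailing non-alphabetic runs do not overlap
    have hsep : (s.takeWhile pvQ).length < s.length - (s.reverse.takeWhile pvQ).length := by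
      by_contra hcon
      rw [Nat.not_lt] at hcon
      have hm : s.length - 1 - (s.takeWhile pvQ).length < (s.reverse.takeWhile pvQ).length := by
        omega
      have h2 := pvTakeWhile_getElem_true pvQ s.reverse (s.length - 1 - (s.takeWhile pvQ).length)
        (by simpa using hm)
      rw [List.getElem_reverse] at h2
      have hidx : s.length - 1 - (s.length - 1 - (s.takeWhile pvQ).length)
          = (s.takeWhile pvQ).length := by omega
      simp only [hidx] at h2
      simp [pvQ, hAtChar] at h2
    rw [if_neg hF, hjA, hiA]
    have hmax : max (s.takeWhile pvQ).length (s.length - (s.reverse.takeWhile pvQ).length)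
        = s.length - (s.reverse.takeWhile pvQ).length := by omega
    rw [hmax]
    have hhead : (pvF s 0).headD 0 = ((s.takeWhile pvQ).length : Int) := by
      rw [pvF_headD s 0 hF]; ring
    have hlast : (pvF s 0).getLastD 0 + 1 = ((s.length - (s.reverse.takeWhile pvQ).length : Nat) : Int) := by
      rw [pvF_getLastD s 0 hF]
      push_cast [htwrle]
      ring
    rw [hhead, hlast]

-- ===== VERDICT (by name: the statement is the Claim_ definition above) =====
theorem split_latin_token_py_spec : Claim_equal_split_latin_token_py := by
  intro tok _
  exact split_latin_token_py_spec_aux tok
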